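-- pv_equiv track=rewrite | github.com/HoJun-Song/workspace | PRO_LV2_멀쩡한사각형.py | solution
-- ===== SOURCE A (Python) =====
-- def solution(w,h):
--     totalCount = w * h
--
--     if w == h:
--         return totalCount - w
--
--     i = min(w, h)
--     while True:
--         if w%i == 0 and h%i ==0:
--             break
--         else:
--             i -= 1
--
--     answer = totalCount - (w + h - i)
--     return answer
-- ===== SOURCE B (Python) =====
-- def solution(w, h):
--     # Euclidean algorithm for gcd, then the closed formula w*h - (w + h - gcd).
--     a, b = w, h
--     while b:
--         a, b = b, a % b
--     return w * h - (w + h - a)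
-- ===== Notes on version B (the rewrite author's own statement) =====
-- stated objective: faster
-- what changed: Replaces A's downward trial-division scan from min(w,h) for the greatest common divisor (and A's special diagonal branch) by the Euclidean algorithm followed by the single closed formula w*h-(w+h-gcd).
-- intended difference: For w < 0 < h with w dividing h, A's loop breaks immediately at the negative divisor i = w and returns w*h - h, while B returns w*h - (w + h - g) with the true positive gcd g = -w, the intended count of unusable squares. — e.g. on solution(-2, 4): A returns -12, B returns -8
import Mathlib
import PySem

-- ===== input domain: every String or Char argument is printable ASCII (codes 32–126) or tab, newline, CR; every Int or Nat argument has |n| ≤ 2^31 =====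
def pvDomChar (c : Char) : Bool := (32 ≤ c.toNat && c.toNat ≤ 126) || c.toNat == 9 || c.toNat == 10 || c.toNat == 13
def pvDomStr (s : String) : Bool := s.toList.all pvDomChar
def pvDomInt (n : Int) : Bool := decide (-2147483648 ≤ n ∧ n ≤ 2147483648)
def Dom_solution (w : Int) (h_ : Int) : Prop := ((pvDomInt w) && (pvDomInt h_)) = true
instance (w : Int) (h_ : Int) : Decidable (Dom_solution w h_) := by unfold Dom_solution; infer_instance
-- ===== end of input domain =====

-- B replaces A's downward trial-division scan for the gcd by the Euclidean algorithm
-- plus the closed formula w*h - (w + h - gcd): asymptotically faster; on w < 0 < h with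
-- w | h (D_ below) A's accidental negative "gcd" is replaced by the intended positive one.


-- ===== PORT A =====
-- A's while loop: decrement i from min(w,h) until it divides both.
-- fuel = (min w h).toNat is a pure totality guard: under Pre_ the loop reaches a
-- common divisor after at most that many decrements (immediately when min w h < 0).
def solutionLoopA (w : Int) (h_ : Int) : Nat → Int → Int
  | 0, i => i
  | fuel + 1, i =>
      if PySem.Int.mod w i = 0 ∧ PySem.Int.mod h_ i = 0 then i
      else solutionLoopA w h_ fuel (i - 1)

def solution (w : Int) (h_ : Int) : Int :=
  let totalCount := w * h_
  if w = h_ then totalCount - w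
  else
    let i := solutionLoopA w h_ (min w h_).toNat (min w h_)
    totalCount - (w + h_ - i)

-- ===== PORT B =====
-- Source B's `while b: a, b = b, a % b`; fuel = h_.natAbs + 1 is a pure totality guard
-- (the Python remainder strictly shrinks |b| each step).
def solutionGcdB : Nat → Int → Int → Int
  | 0, a, _ => a
  | fuel + 1, a, b =>
      if b = 0 then a else solutionGcdB fuel b (PySem.Int.mod a b)

def solution_alt (w : Int) (h_ : Int) : Int :=
  let a := solutionGcdB (h_.natAbs + 1) w h_
  w * h_ - (w + h_ - a)

-- ===== PRECONDITION & SPEC =====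
-- Pre_ excludes exactly the inputs where A never returns: w ≠ h_ with min(w,h_) = 0
-- (ZeroDivisionError) or with min(w,h_) < 0 not dividing both sides (the loop
-- decrements forever).
def Pre_solution (w : Int) (h_ : Int) : Prop :=
  (1 ≤ w ∧ 1 ≤ h_) ∨ w = h_ ∨ (min w h_ < 0 ∧ min w h_ ∣ w ∧ min w h_ ∣ h_)
instance (w : Int) (h_ : Int) : Decidable (Pre_solution w h_) := by unfold Pre_solution; infer_instance
def pvWitness_solution : Int × Int := (12, 8)

-- When w < 0 < h_ and w divides h_, A's loop breaks at once at the NEGATIVE divisor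
-- i = w and returns w*h_ - h_, while B returns w*h_ - (w + h_ - g) with the true
-- positive gcd g = -w, the intended count of uncut squares.
def D_solution (w : Int) (h_ : Int) : Prop := w < 0 ∧ 0 < h_ ∧ w ∣ h_
instance (w : Int) (h_ : Int) : Decidable (D_solution w h_) := by unfold D_solution; infer_instance

def Spec_solution (w : Int) (h_ : Int) (out : Int) : Prop := ¬ D_solution w h_ → out = solution_alt w h_
instance (w : Int) (h_ : Int) (out : Int) : Decidable (Spec_solution w h_ out) := by unfold Spec_solution; infer_instance

def pvDiffWitness_solution : Int × Int := (-2, 4)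
def pvDiffWitnessOut_solution : Int × Int := (-12, -8)

-- ===== CLAIM (what is proved, stated in full; the proofs are below) =====
def Claim_unchanged_solution : Prop := ∀ (w : Int) (h_ : Int), Dom_solution w h_ → Pre_solution w h_ → Spec_solution w h_ (solution w h_)
def Claim_changed_solution : Prop := Dom_solution (pvDiffWitness_solution.1) (pvDiffWitness_solution.2) ∧ Pre_solution (pvDiffWitness_solution.1) (pvDiffWitness_solution.2) ∧ D_solution (pvDiffWitness_solution.1) (pvDiffWitness_solution.2) ∧ solution (pvDiffWitness_solution.1) (pvDiffWitness_solution.2) = pvDiffWitnessOut_solution.1 ∧ solution_alt (pvDiffWitness_solution.1) (pvDiffWitness_solution.2) = pvDiffWitnessOut_solution.2 ∧ pvDiffWitnessOut_solution.1 ≠ pvDiffWitnessOut_solution.2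
def Claim_exact_solution : Prop := ∀ (w : Int) (h_ : Int), Dom_solution w h_ → Pre_solution w h_ → D_solution w h_ → solution w h_ ≠ solution_alt w h_

-- ===== LEMMAS AND PROOFS =====

-- Python's a % b is 0 when b divides a.
theorem mod_eq_zero_of_dvd {a b : Int} (h : b ∣ a) : PySem.Int.mod a b = 0 :=
  (PySem.Int.mod_eq_zero_iff_dvd a b).mpr h

-- B's loop stops after two steps when b ≠ 0 divides a, returning b.
theorem gcdB_dvd (n : Nat) (a b : Int) (hb : b ≠ 0) (hd : b ∣ a) :
    solutionGcdB (n + 2) a b = b := by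
  simp [solutionGcdB, hb, mod_eq_zero_of_dvd hd]

-- B's loop computes Int.gcd on nonnegative inputs (given enough fuel).
theorem gcdB_eq_gcd : ∀ (n : Nat) (a b : Int), 0 ≤ a → 0 ≤ b → b.natAbs < n →
    solutionGcdB n a b = (Int.gcd a b : Int) := by
  intro n
  induction n with
  | zero => intro a b _ _ hlt; omega
  | succ n ih =>
    intro a b ha hb hlt
    by_cases hbz : b = 0
    · subst hbz
      simp [solutionGcdB, Int.gcd, Int.natAbs_of_nonneg ha]
    · have hbpos : 0 < b := lt_of_le_of_ne hb (Ne.symm hbz)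
      have hmod : PySem.Int.mod a b = a % b := PySem.Int.mod_eq_emod_of_pos hbpos
      have hr0 : 0 ≤ a % b := Int.emod_nonneg a hbz
      have hrlt : a % b < b := Int.emod_lt_of_pos a hbpos
      have hfit : (a % b).natAbs < n := by omega
      have := ih b (a % b) hb hr0 hfit
      simp only [solutionGcdB, if_neg hbz, hmod, this]
      congr 1
      rw [Int.gcd, Int.gcd]
      have habs : (a % b).natAbs = a.natAbs % b.natAbs := by
        have ha' : (a.natAbs : Int) = a := Int.natAbs_of_nonneg ha
        have hb' : (b.natAbs : Int) = b := Int.natAbs_of_nonneg hb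
        calc (a % b).natAbs = ((a.natAbs : Int) % (b.natAbs : Int)).natAbs := by rw [ha', hb']
          _ = ((↑(a.natAbs % b.natAbs) : Int)).natAbs := by rw [Int.natCast_mod]
          _ = a.natAbs % b.natAbs := Int.natAbs_natCast _
      rw [habs, Nat.gcd_comm, ← Nat.gcd_rec, Nat.gcd_comm]

-- A's loop, started at or above the gcd with enough fuel, returns the gcd (w, h ≥ 1).
theorem loopA_eq_gcd (w h_ : Int) (hw : 1 ≤ w) (hh : 1 ≤ h_) :
    ∀ (fuel : Nat) (i : Int), (Int.gcd w h_ : Int) ≤ i → (i - (Int.gcd w h_ : Int)).toNat < fuel →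
      solutionLoopA w h_ fuel i = (Int.gcd w h_ : Int) := by
  set g : Int := (Int.gcd w h_ : Int) with hg
  have hgpos : 0 < g := by
    have : w ≠ 0 := by omega
    have := Int.gcd_pos_of_ne_zero_left h_ this
    omega
  intro fuel
  induction fuel with
  | zero => intro i hge hlt; omega
  | succ n ih =>
    intro i hge hlt
    by_cases hdiv : PySem.Int.mod w i = 0 ∧ PySem.Int.mod h_ i = 0
    · have hiw : i ∣ w := (PySem.Int.mod_eq_zero_iff_dvd w i).mp hdiv.1
      have hih : i ∣ h_ := (PySem.Int.mod_eq_zero_iff_dvd h_ i).mp hdiv.2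
      have hig : i ∣ g := by
        rw [hg]
        exact Int.natAbs_dvd.mp (Int.natCast_dvd_natCast.mpr
          (Nat.dvd_gcd (Int.natAbs_dvd_natAbs.mpr hiw) (Int.natAbs_dvd_natAbs.mpr hih)))
      have hle : i ≤ g := Int.le_of_dvd hgpos hig
      have hieq : i = g := le_antisymm hle hge
      simp only [solutionLoopA, if_pos hdiv]
      exact hieq
    · have hne : i ≠ g := by
        intro heq
        exact hdiv ⟨mod_eq_zero_of_dvd (by rw [heq, hg]; exact Int.gcd_dvd_left w h_),
                    mod_eq_zero_of_dvd (by rw [heq, hg]; exact Int.gcd_dvd_right w h_)⟩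
      have hge' : g ≤ i - 1 := by omega
      have hlt' : (i - 1 - g).toNat < n := by omega
      simp only [solutionLoopA, if_neg hdiv]
      exact ih (i - 1) hge' hlt'

-- ===== VERDICT (by name: the statement is the Claim_ definition above) =====
theorem solution_spec : Claim_unchanged_solution := by
  intro w h_ _ hpre hnD
  unfold solution solution_alt
  by_cases hwh : w = h_
  · subst hwh
    by_cases h0 : w = 0
    · subst h0; decide
    · have hfe : w.natAbs + 1 = (w.natAbs - 1) + 2 := by omega
      rw [hfe, gcdB_dvd _ _ _ h0 dvd_rfl]
      simp
  · rcases hpre with ⟨hw, hh⟩ | heq | ⟨hmin, hdw, hdh⟩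
    · -- both sides compute the (positive) gcd
      have hgmin : (Int.gcd w h_ : Int) ≤ min w h_ := by
        have h1 : (Int.gcd w h_ : Int) ∣ w := Int.gcd_dvd_left w h_
        have h2 : (Int.gcd w h_ : Int) ∣ h_ := Int.gcd_dvd_right w h_
        have := Int.le_of_dvd (by omega) h1
        have := Int.le_of_dvd (by omega) h2
        omega
      have hgpos : 0 < (Int.gcd w h_ : Int) := by
        have : w ≠ 0 := by omega
        have := Int.gcd_pos_of_ne_zero_left h_ this
        omega
      have hA := loopA_eq_gcd w h_ hw hh (min w h_).toNat (min w h_) hgmin (by omega)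
      have hB := gcdB_eq_gcd (h_.natAbs + 1) w h_ (by omega) (by omega) (by omega)
      simp only [if_neg hwh, hA, hB]
    · exact absurd heq hwh
    · -- min w h_ < 0 divides both and we are outside D_
      by_cases hlt : h_ < w
      · -- min = h_ < 0 divides w: A breaks at i = h_, B's Euclid stops at a = h_
        have hmeq : min w h_ = h_ := min_eq_right (le_of_lt hlt)
        rw [hmeq] at hmin hdh hdw ⊢
        have hhz : h_ ≠ 0 := by omega
        have hfe : h_.natAbs + 1 = (h_.natAbs - 1) + 2 := by omega
        rw [hfe, gcdB_dvd _ _ _ hhz hdw]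
        have ht : h_.toNat = 0 := by omega
        rw [ht]
        simp [solutionLoopA, if_neg hwh]
      · -- min = w < 0: outside D_ forces h_ = 0 (w ∣ h_ with w < h_ < 0 is impossible)
        have hmeq : min w h_ = w := min_eq_left (by omega)
        rw [hmeq] at hmin hdh ⊢
        have hh0 : h_ = 0 := by
          by_contra hne
          rcases (lt_or_gt_of_ne hne) with hneg | hpos
          · have := Nat.le_of_dvd (by omega) (Int.natAbs_dvd_natAbs.mpr hdh)
            omega
          · exact hnD ⟨hmin, hpos, hdh⟩
        subst hh0
        have ht : w.toNat = 0 := by omega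
        rw [ht]
        simp [solutionLoopA, solutionGcdB, if_neg hwh]

theorem solution_changed : Claim_changed_solution := by unfold Claim_changed_solution; decide

theorem solution_tight : Claim_exact_solution := by
  intro w h_ _ _ hD
  rcases hD with ⟨hw, hh, hdvd⟩
  have hwh : w ≠ h_ := by omega
  have hmeq : min w h_ = w := min_eq_left (by omega)
  unfold solution solution_alt
  simp only [if_neg hwh, hmeq]
  have ht : w.toNat = 0 := by omega
  rw [ht]
  have hhz : h_ ≠ 0 := by omega
  have hstep : solutionGcdB (h_.natAbs + 1) w h_
      = solutionGcdB h_.natAbs h_ (PySem.Int.mod w h_) := by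
    simp [solutionGcdB, hhz]
  have hmod : PySem.Int.mod w h_ = w % h_ := PySem.Int.mod_eq_emod_of_pos hh
  have hr0 : 0 ≤ w % h_ := Int.emod_nonneg w hhz
  have hrlt : w % h_ < h_ := Int.emod_lt_of_pos w hh
  have hB : solutionGcdB h_.natAbs h_ (PySem.Int.mod w h_)
      = (Int.gcd h_ (w % h_) : Int) := by
    rw [hmod]
    exact gcdB_eq_gcd h_.natAbs h_ (w % h_) (by omega) hr0 (by omega)
  have hBn : 0 ≤ solutionGcdB (h_.natAbs + 1) w h_ := by
    rw [hstep, hB]; positivity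
  simp only [solutionLoopA]
  omega
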